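-- pv_equiv track=rewrite | github.com/ARAO182002/Performance-Testing | backend/server.py | find_latest_field_source
-- ===== SOURCE A (Python) =====
-- def find_latest_field_source(field, results, current_api):
--     field = field.lower()
--
--     for res in reversed(results):
--         if res.get("api") == current_api:
--             continue
--
--         response = res.get("response", "").lower()
--
--         if field in response or "order no" in response:
--             return res.get("api")
--
--     return None
-- ===== SOURCE B (Python) =====
-- def find_latest_field_source(field, results, current_api):
--     field = field.lower()
--     latest = None
--     for res in results:
--         if res.get("api") == current_api:
--             continue
--         response = res.get("response", "").lower()
--         if field in response or "order no" in response:
--             latest = res.get("api")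
--     return latest
-- ===== Notes on version B (the rewrite author's own statement) =====
-- stated objective: alternative
-- what changed: Single forward pass keeping the last matching result's api in an accumulator, instead of A's reversed() scan with early return on the first backward match.
import Mathlib
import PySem

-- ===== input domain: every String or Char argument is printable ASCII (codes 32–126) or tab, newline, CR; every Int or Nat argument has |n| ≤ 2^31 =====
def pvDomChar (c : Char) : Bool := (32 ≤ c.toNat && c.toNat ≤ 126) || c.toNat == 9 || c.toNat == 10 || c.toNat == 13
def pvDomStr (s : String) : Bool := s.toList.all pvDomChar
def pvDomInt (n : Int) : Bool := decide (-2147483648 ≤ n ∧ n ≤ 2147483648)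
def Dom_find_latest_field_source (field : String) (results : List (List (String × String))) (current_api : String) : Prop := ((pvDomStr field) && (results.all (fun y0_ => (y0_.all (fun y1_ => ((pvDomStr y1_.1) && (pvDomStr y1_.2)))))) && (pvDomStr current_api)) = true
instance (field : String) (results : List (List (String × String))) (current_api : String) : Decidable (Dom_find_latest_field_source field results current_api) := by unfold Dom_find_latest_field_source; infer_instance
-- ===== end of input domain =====

-- B replaces A's reversed() early-return scan by a single forward pass with a `latest` accumulator (alternative decomposition, same cost; return value only).

-- ===== PORT A =====
-- does this result match? (res.get("api") == current_api → skip; field/"order no" in lowered response)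
def pvSkipA (res : List (String × String)) (current_api : String) : Bool :=
  (PySem.Dict.ofList res).get? "api" == some current_api

def pvMatchA (f : String) (res : List (String × String)) : Bool :=
  let response := PySem.Str.lower ((PySem.Dict.ofList res).getD "response" "")
  PySem.Str.isIn f response || PySem.Str.isIn "order no" response

-- the for-loop over reversed(results): `some r` = the loop returned r (r = res.get("api"), possibly none), `none` = fell through
def pvLoopA (f : String) (current_api : String) : List (List (String × String)) → Option (Option String)
  | [] => none
  | res :: rest =>
      if pvSkipA res current_api then pvLoopA f current_api rest
      else if pvMatchA f res then some ((PySem.Dict.ofList res).get? "api")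
      else pvLoopA f current_api rest

def find_latest_field_source (field : String) (results : List (List (String × String))) (current_api : String) : Option String :=
  (pvLoopA (PySem.Str.lower field) current_api results.reverse).getD none

-- ===== PORT B =====
-- forward fold keeping the last matching result's api in `latest`
def pvStepB (f : String) (current_api : String) (latest : Option String) (res : List (String × String)) : Option String :=
  if (PySem.Dict.ofList res).get? "api" == some current_api then latest
  else
    let response := PySem.Str.lower ((PySem.Dict.ofList res).getD "response" "")
    if PySem.Str.isIn f response || PySem.Str.isIn "order no" response then
      (PySem.Dict.ofList res).get? "api"
    else latest

def find_latest_field_source_alt (field : String) (results : List (List (String × String))) (current_api : String) : Option String :=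
  results.foldl (pvStepB (PySem.Str.lower field) current_api) none

-- ===== PRECONDITION & SPEC =====
def Spec_find_latest_field_source (field : String) (results : List (List (String × String))) (current_api : String) (out : Option String) : Prop := out = find_latest_field_source_alt field results current_api
instance (field : String) (results : List (List (String × String))) (current_api : String) (out : Option String) : Decidable (Spec_find_latest_field_source field results current_api out) := by unfold Spec_find_latest_field_source; infer_instance

-- ===== CLAIM (what is proved, stated in full; the proofs are below) =====
def Claim_equal_find_latest_field_source : Prop := ∀ (field : String) (results : List (List (String × String))) (current_api : String), Dom_find_latest_field_source field results current_api → Spec_find_latest_field_source field results current_api (find_latest_field_source field results current_api)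

-- ===== LEMMAS AND PROOFS =====

theorem pvLoopA_append (f c : String) (l l' : List (List (String × String))) :
    pvLoopA f c (l ++ l') =
      (match pvLoopA f c l with
       | none => pvLoopA f c l'
       | r => r) := by
  induction l with
  | nil => simp [pvLoopA]
  | cons x xs ih =>
      simp only [List.cons_append, pvLoopA]
      split_ifs <;> simp [ih]

-- B's fold equals A's reverse-first-hit with the accumulator as the fall-through value
theorem foldl_eq_loopA (f c : String) :
    ∀ (l : List (List (String × String))) (acc : Option String),
      l.foldl (pvStepB f c) acc = (pvLoopA f c l.reverse).getD acc := by
  intro l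
  induction l with
  | nil => intro acc; simp [pvLoopA]
  | cons x xs ih =>
      intro acc
      simp only [List.foldl_cons, List.reverse_cons, pvLoopA_append, ih]
      cases h : pvLoopA f c xs.reverse with
      | some r => rfl
      | none =>
          simp only [pvStepB, pvLoopA, pvSkipA, pvMatchA]
          split_ifs <;> rfl

-- ===== VERDICT (by name: the statement is the Claim_ definition above) =====
theorem find_latest_field_source_spec : Claim_equal_find_latest_field_source := by
  intro field results current_api _
  unfold Spec_find_latest_field_source find_latest_field_source find_latest_field_source_alt
  rw [foldl_eq_loopA]
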